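-- pv_equiv track=rewrite | github.com/ericpassmore/python_examples | SmallestDivide11.py | solution
-- ===== SOURCE A (Python) =====
-- def solution(input):
--     # type check for list
--     if type(input) != list:
--         raise ValueError("expected list of integers as input")
--     new_list = []
--     # iterate over list return values evenly divisable by 11
--     for number in input:
--         if number % 11 == 0:
--             new_list.append(number)
--     # Please write your code here.
--     if new_list:
--         return min(new_list)
--     else:
--         return None
-- ===== SOURCE B (Python) =====
-- def solution(input):
--     # type check for list
--     if type(input) != list:
--         raise ValueError("expected list of integers as input")
--     best = None
--     # single pass: fuse the filter and the min reduction
--     for number in input: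
--         if number % 11 == 0:
--             if best is None or number < best:
--                 best = number
--     return best
-- ===== Notes on version B (the rewrite author's own statement) =====
-- stated objective: simpler
-- what changed: Replaces the build-filtered-list-then-min decomposition with a single fused pass keeping a running-min accumulator (best = None), with no intermediate list.
import Mathlib
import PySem

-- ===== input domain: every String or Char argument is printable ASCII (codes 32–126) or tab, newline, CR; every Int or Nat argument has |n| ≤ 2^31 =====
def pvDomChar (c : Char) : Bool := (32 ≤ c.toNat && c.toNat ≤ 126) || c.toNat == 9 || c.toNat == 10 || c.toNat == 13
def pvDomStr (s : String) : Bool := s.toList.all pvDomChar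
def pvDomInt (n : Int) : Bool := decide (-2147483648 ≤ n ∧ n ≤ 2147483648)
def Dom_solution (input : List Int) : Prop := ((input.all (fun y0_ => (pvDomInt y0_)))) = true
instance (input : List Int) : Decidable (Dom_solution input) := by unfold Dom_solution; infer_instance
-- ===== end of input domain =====

-- B fuses A's filter-into-a-list-then-min into one pass with a running-min accumulator (objective: simpler, O(1) extra space).

-- ===== PORT A =====
-- builds new_list of multiples of 11, then returns min(new_list) if nonempty else None
def solution (input : List Int) : Option Int :=
  let new_list := input.foldl (fun acc number =>
    if PySem.Int.mod number 11 = 0 then acc ++ [number] else acc) []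
  if new_list ≠ [] then PySem.List.min? new_list (fun x => x) else none

-- ===== PORT B =====
-- single pass with a running best : Option Int
def solution_alt (input : List Int) : Option Int :=
  input.foldl (fun best number =>
    if PySem.Int.mod number 11 = 0 then
      match best with
      | none => some number
      | some b => if number < b then some number else some b
    else best) none

-- ===== PRECONDITION & SPEC =====
def Spec_solution (input : List Int) (out : Option Int) : Prop := out = solution_alt input
instance (input : List Int) (out : Option Int) : Decidable (Spec_solution input out) := by unfold Spec_solution; infer_instance

-- ===== CLAIM (what is proved, stated in full; the proofs are below) =====
def Claim_equal_solution : Prop := ∀ (input : List Int), Dom_solution input → Spec_solution input (solution input)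

-- ===== LEMMAS AND PROOFS =====

theorem pv_min?_snoc (acc : List Int) (n : Int) :
    PySem.List.min? (acc ++ [n]) (fun x => x) =
      (match PySem.List.min? acc (fun x => x) with
       | none => some n
       | some b => if n < b then some n else some b) := by
  cases acc with
  | nil => simp [PySem.List.min?]
  | cons a t =>
      rw [show (a :: t) ++ [n] = a :: (t ++ [n]) from rfl,
          PySem.List.min?_id_cons, PySem.List.min?_id_cons]
      simp only [List.foldl_append, List.foldl_cons, List.foldl_nil]
      rcases lt_or_ge n (t.foldl min a) with h | h
      · simp [min_eq_right (le_of_lt h), h]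
      · simp [min_eq_left h, not_lt.mpr h]

theorem pv_main (l acc : List Int) :
    (if (l.foldl (fun acc number =>
        if PySem.Int.mod number 11 = 0 then acc ++ [number] else acc) acc) ≠ [] then
      PySem.List.min? (l.foldl (fun acc number =>
        if PySem.Int.mod number 11 = 0 then acc ++ [number] else acc) acc) (fun x => x)
     else none) =
    l.foldl (fun best number =>
      if PySem.Int.mod number 11 = 0 then
        match best with
        | none => some number
        | some b => if number < b then some number else some b
      else best) (PySem.List.min? acc (fun x => x)) := by
  induction l generalizing acc with
  | nil =>
      cases acc with
      | nil => simp [PySem.List.min?]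
      | cons a t => simp [PySem.List.min?_id_cons]
  | cons n t ih =>
      simp only [List.foldl_cons]
      by_cases h : PySem.Int.mod n 11 = 0
      · simp only [h, if_true]
        rw [ih (acc ++ [n]), pv_min?_snoc]
      · simp only [h, if_false]
        exact ih acc

-- ===== VERDICT (by name: the statement is the Claim_ definition above) =====
theorem solution_spec : Claim_equal_solution := by
  intro input _
  unfold Spec_solution solution solution_alt
  have := pv_main input []
  simpa [PySem.List.min?] using this
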